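-- pv_equiv track=rewrite | github.com/E-cyborg/python-dsa | practice programs/chapter 3/31.py | checking_number
-- ===== SOURCE A (Python) =====
-- def checking_number(num):
--     temp=0
--     a=0
--     b=1
--     c=2
--     result= [a,b,c]
--     while temp<= num:
--         if num in [a,b,c,temp]:
--             return True , result
--         temp=a+b+c
--         a=b
--         b=c
--         c=temp
--         if temp>num:
--             return False,result
--         result.append(temp)
-- ===== SOURCE B (Python) =====
-- def checking_number(num):
--     # Recursively build the (strictly increasing) tribonacci list front-to-back,
--     # then answer membership in O(1) from monotonicity: num is a member iff it is
--     # one of the three seed values or equals the largest generated term.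
--     def extend(a, b, c):
--         t = a + b + c
--         if t > num:
--             return []
--         return [t] + extend(b, c, t)
--     result = [0, 1, 2] + extend(0, 1, 2)
--     return num == result[-1] or 0 <= num <= 2, result
-- ===== Notes on version B (the rewrite author's own statement) =====
-- stated objective: alternative
-- what changed: A interleaves a small membership test and two early returns inside an imperative sliding-window loop; B builds the list by a recursive front-to-back construction and answers membership in O(1) using monotonicity (num is a member iff it is one of the three seed values or equals the largest generated term), with no membership scan at all.
-- outside the precondition, e.g. on checking_number(-1): A returns None, B returns (False, [0, 1, 2])
import Mathlib
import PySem

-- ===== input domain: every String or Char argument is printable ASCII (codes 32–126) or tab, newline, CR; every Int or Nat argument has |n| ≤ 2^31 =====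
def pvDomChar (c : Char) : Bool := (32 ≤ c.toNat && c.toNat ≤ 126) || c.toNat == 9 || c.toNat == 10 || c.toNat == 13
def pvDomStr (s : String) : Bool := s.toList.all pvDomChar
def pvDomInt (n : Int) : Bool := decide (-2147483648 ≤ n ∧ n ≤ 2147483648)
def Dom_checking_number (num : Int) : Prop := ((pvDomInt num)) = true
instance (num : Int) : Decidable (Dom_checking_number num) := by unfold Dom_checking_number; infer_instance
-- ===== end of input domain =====

-- B builds the tribonacci list by a recursive front-to-back construction and answers membership
-- in O(1) from monotonicity (a seed value or the last element), instead of A's imperative loop with a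
-- per-iteration membership test and early returns (objective: alternative).


-- ===== PORT A =====
-- A's while loop; fuel only makes the recursion total (num.toNat + 2 iterations always suffice,
-- since temp strictly increases and the loop runs only while temp ≤ num).
-- On the `¬ temp ≤ num` branch Python falls off the function returning None (only reachable for
-- num < 0, excluded by Pre_); the port returns (false, res) there.
def chkLoopA (num temp a b c : Int) (res : List Int) : Nat → Bool × List Int
  | 0 => (false, res)
  | n + 1 =>
    if temp ≤ num then
      if num ∈ ([a, b, c, temp] : List Int) then (true, res)
      else
        let t := a + b + c
        if t > num then (false, res)
        else chkLoopA num t b c t (res ++ [t]) n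
    else (false, res)

def checking_number (num : Int) : Bool × List Int :=
  chkLoopA num 0 0 1 2 [0, 1, 2] (num.toNat + 2)

-- ===== PORT B =====
-- B's recursive list builder (fuel only for totality: terms grow by at least 1 per step).
def extB (num a b c : Int) : Nat → List Int
  | 0 => []
  | n + 1 =>
    let t := a + b + c
    if t > num then []
    else t :: extB num b c t n

def checking_number_alt (num : Int) : Bool × List Int :=
  let result := ([0, 1, 2] : List Int) ++ extB num 0 1 2 (num.toNat + 2)
  ((PySem.List.pyGet? result (-1) == some num) || (decide (0 ≤ num) && decide (num ≤ 2)), result)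

-- ===== PRECONDITION & SPEC =====
-- Pre_ excludes num < 0, where A's while loop never runs and the function falls off
-- returning None, which is not a (bool, list) value.
def Pre_checking_number (num : Int) : Prop := 0 ≤ num
instance (num : Int) : Decidable (Pre_checking_number num) := by unfold Pre_checking_number; infer_instance
def pvWitness_checking_number : Int := 5

def Spec_checking_number (num : Int) (out : Bool × List Int) : Prop := out = checking_number_alt num
instance (num : Int) (out : Bool × List Int) : Decidable (Spec_checking_number num out) := by unfold Spec_checking_number; infer_instance

-- ===== CLAIM (what is proved, stated in full; the proofs are below) =====
def Claim_equal_checking_number : Prop := ∀ (num : Int), Dom_checking_number num → Pre_checking_number num → Spec_checking_number num (checking_number num)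

-- ===== LEMMAS AND PROOFS =====

-- Lockstep invariant at A's loop head (after the first iteration, temp = c): with the last three
-- terms 0 ≤ a < b < c ≤ num and c the last element of res, A's remaining loop returns exactly
-- B's extension of res, and A's early True/False returns coincide with "num is the last element".
lemma chkLoop_eq (num : Int) :
    ∀ (n : Nat) (a b c : Int) (res : List Int),
      0 ≤ a → a < b → b < c → c ≤ num → res.getLast? = some c →
      (num - c).toNat < n →
      chkLoopA num c a b c res n
        = (((res ++ extB num a b c n).getLast? == some num), res ++ extB num a b c n) := by
  intro n
  induction n with
  | zero => intro a b c res _ _ _ _ _ hfuel; omega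
  | succ n ih =>
    intro a b c res ha hab hbc hcn hlast hfuel
    by_cases hnum : num = c
    · -- A returns True; B's builder stops (a+b+c > num) and num is the last element of res.
      simp [chkLoopA, extB, hnum, hlast, show 0 < a + b by omega]
    · have hgt : c < num := lt_of_le_of_ne (by omega) (fun h => hnum h.symm)
      have hmem : num ∉ ([a, b, c, c] : List Int) := by
        simp only [List.mem_cons, List.not_mem_nil, or_false]; omega
      by_cases hrec : a + b + c ≤ num
      · -- both sides take one more step
        have := ih b c (a + b + c) (res ++ [a + b + c]) (by omega) hbc (by omega) hrec
          (by simp) (by omega)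
        simp only [chkLoopA, extB, hcn, hmem, if_pos hrec, if_true, if_false,
          show ¬ a + b + c > num by omega, ite_false]
        simpa using this
      · -- A returns (False, res); the builder stops; res's last element is c < num
        have : (some c == some num) = false := by simp; omega
        simp [chkLoopA, extB, hrec, hmem, hcn, show a + b + c > num by omega, hlast, this]

-- ===== VERDICT (by name: the statement is the Claim_ definition above) =====
theorem checking_number_spec : Claim_equal_checking_number := by
  intro num _ hpre
  unfold Spec_checking_number checking_number checking_number_alt
  have hpre : 0 ≤ num := hpre
  by_cases h5 : num ≤ 5
  · -- finitely many small inputs: evaluate both ports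
    interval_cases num <;> decide
  · -- num ≥ 6: peel the first two steps of each recursion, then use the lockstep lemma
    have h6 : 6 ≤ num := by omega
    have key := chkLoop_eq num num.toNat 2 3 6 [0, 1, 2, 3, 6]
      (by omega) (by omega) (by omega) h6 (by simp) (by omega)
    have hm1 : num ∉ ([0, 1, 2, 0] : List Int) := by
      simp only [List.mem_cons, List.not_mem_nil, or_false]; omega
    have hm2 : num ∉ ([1, 2, 3, 3] : List Int) := by
      simp only [List.mem_cons, List.not_mem_nil, or_false]; omega
    have hle : (decide (0 ≤ num) && decide (num ≤ 2)) = false := by simp; omega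
    have s1 : chkLoopA num 0 0 1 2 [0, 1, 2] (num.toNat + 2)
        = chkLoopA num 6 2 3 6 [0, 1, 2, 3, 6] num.toNat := by
      norm_num [chkLoopA, hm1, hm2, show (0 : Int) ≤ num by omega,
        show (3 : Int) ≤ num by omega, show ¬ (3 : Int) > num by omega,
        show ¬ (6 : Int) > num by omega]
    have s2 : ([0, 1, 2] : List Int) ++ extB num 0 1 2 (num.toNat + 2)
        = [0, 1, 2, 3, 6] ++ extB num 2 3 6 num.toNat := by
      norm_num [extB, show ¬ (3 : Int) > num by omega, show ¬ (6 : Int) > num by omega]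
    rw [s1, s2, key]
    simp [PySem.List.pyGet?_neg_one, hle]
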